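-- pv_equiv track=rewrite | github.com/Sravan-VLSI-Dev/-mcp-firmware-generator | main.py | parse_compilation_errors
-- ===== SOURCE A (Python) =====
-- from typing import Optional, List, Dict
--
-- def parse_compilation_errors(output: str) -> Dict:
--     """Parse compilation errors."""
--     errors_dict = {
--         "syntax_errors": [],
--         "missing_headers": [],
--         "undefined_references": [],
--         "type_errors": [],
--         "ledc_api_errors": [],
--         "other_errors": []
--     }
--
--     for line in output.split("\n"):
--         if "error:" not in line.lower():
--             continue
--
--         line_clean = line.strip()
--         if not line_clean:
--             continue
--
--         # Check for LEDC API errors (old API incompatible with v3.x)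
--         if ("ledcAttachPin" in line or "GPIO_NUM_" in line) and "not declared" in line.lower():
--             errors_dict["ledc_api_errors"].append(line_clean)
--         elif "fatal error:" in line.lower() and ".h:" in line:
--             errors_dict["missing_headers"].append(line_clean)
--         elif "undefined reference" in line.lower():
--             errors_dict["undefined_references"].append(line_clean)
--         elif "error:" in line.lower() and ("expected" in line or "undeclared" in line):
--             errors_dict["syntax_errors"].append(line_clean)
--         elif "error:" in line.lower() and ("type" in line or "cannot" in line):
--             errors_dict["type_errors"].append(line_clean)
--         else:
--             errors_dict["other_errors"].append(line_clean)
--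
--     return errors_dict
-- ===== SOURCE B (Python) =====
-- def parse_compilation_errors(output: str):
--     """Parse compilation errors (classify-then-group decomposition)."""
--     def classify(line):
--         low = line.lower()
--         if ("ledcAttachPin" in line or "GPIO_NUM_" in line) and "not declared" in low:
--             return "ledc_api_errors"
--         if "fatal error:" in low and ".h:" in line:
--             return "missing_headers"
--         if "undefined reference" in low:
--             return "undefined_references"
--         if "expected" in line or "undeclared" in line:
--             return "syntax_errors"
--         if "type" in line or "cannot" in line:
--             return "type_errors"
--         return "other_errors"
--
--     tagged = [(classify(l), l.strip()) for l in output.split("\n")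
--               if "error:" in l.lower() and l.strip()]
--     return {k: [s for c, s in tagged if c == k]
--             for k in ("syntax_errors", "missing_headers", "undefined_references",
--                       "type_errors", "ledc_api_errors", "other_errors")}
-- ===== Notes on version B (the rewrite author's own statement) =====
-- stated objective: alternative
-- what changed: B replaces A's single pass that mutates a pre-built six-bucket dict via an elif cascade with a classify-then-group decomposition: each kept error line is tagged once by a classifier function, and each bucket is then produced by an independent grouping pass over the tagged list.
import Mathlib
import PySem

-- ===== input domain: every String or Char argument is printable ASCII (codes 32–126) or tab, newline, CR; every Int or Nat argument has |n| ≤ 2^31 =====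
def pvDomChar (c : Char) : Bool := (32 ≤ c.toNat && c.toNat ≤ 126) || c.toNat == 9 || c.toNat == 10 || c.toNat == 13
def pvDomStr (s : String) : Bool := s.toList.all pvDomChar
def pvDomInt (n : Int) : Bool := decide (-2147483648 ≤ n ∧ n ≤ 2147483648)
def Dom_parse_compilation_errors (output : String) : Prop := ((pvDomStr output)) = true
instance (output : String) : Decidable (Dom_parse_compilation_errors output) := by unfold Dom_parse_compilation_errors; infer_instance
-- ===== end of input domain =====

-- B classifies each error line once and builds each bucket by one grouping pass; same values, alternative decomposition.

-- ===== PORT A =====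
-- loop body of A's for-loop (the elif cascade appending into the mutable dict)
def pvStepA (d : PySem.Dict String (List String)) (line : String) : PySem.Dict String (List String) :=
  if !(PySem.Str.isIn "error:" (PySem.Str.lower line)) then d
  else
    let lineClean := PySem.Str.strip line
    if lineClean == "" then d
    else if (PySem.Str.isIn "ledcAttachPin" line || PySem.Str.isIn "GPIO_NUM_" line)
            && PySem.Str.isIn "not declared" (PySem.Str.lower line) then
      d.modify "ledc_api_errors" [] (· ++ [lineClean])
    else if PySem.Str.isIn "fatal error:" (PySem.Str.lower line) && PySem.Str.isIn ".h:" line then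
      d.modify "missing_headers" [] (· ++ [lineClean])
    else if PySem.Str.isIn "undefined reference" (PySem.Str.lower line) then
      d.modify "undefined_references" [] (· ++ [lineClean])
    else if PySem.Str.isIn "error:" (PySem.Str.lower line)
            && (PySem.Str.isIn "expected" line || PySem.Str.isIn "undeclared" line) then
      d.modify "syntax_errors" [] (· ++ [lineClean])
    else if PySem.Str.isIn "error:" (PySem.Str.lower line)
            && (PySem.Str.isIn "type" line || PySem.Str.isIn "cannot" line) then
      d.modify "type_errors" [] (· ++ [lineClean])
    else
      d.modify "other_errors" [] (· ++ [lineClean])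

def parse_compilation_errors (output : String) : List (String × List String) :=
  let errorsDict : PySem.Dict String (List String) :=
    PySem.Dict.ofList [("syntax_errors", []), ("missing_headers", []),
      ("undefined_references", []), ("type_errors", []), ("ledc_api_errors", []),
      ("other_errors", [])]
  (((PySem.Str.split? output "\n").getD []).foldl pvStepA errorsDict).items

-- ===== PORT B =====
-- B's classifier: the bucket key of one error line
def pvClassify (line : String) : String :=
  let low := PySem.Str.lower line
  if (PySem.Str.isIn "ledcAttachPin" line || PySem.Str.isIn "GPIO_NUM_" line)
      && PySem.Str.isIn "not declared" low then "ledc_api_errors"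
  else if PySem.Str.isIn "fatal error:" low && PySem.Str.isIn ".h:" line then "missing_headers"
  else if PySem.Str.isIn "undefined reference" low then "undefined_references"
  else if PySem.Str.isIn "expected" line || PySem.Str.isIn "undeclared" line then "syntax_errors"
  else if PySem.Str.isIn "type" line || PySem.Str.isIn "cannot" line then "type_errors"
  else "other_errors"

def parse_compilation_errors_alt (output : String) : List (String × List String) :=
  let tagged := (((PySem.Str.split? output "\n").getD []).filter
      (fun l => PySem.Str.isIn "error:" (PySem.Str.lower l) && !(PySem.Str.strip l == ""))).map
      (fun l => (pvClassify l, PySem.Str.strip l))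
  ["syntax_errors", "missing_headers", "undefined_references", "type_errors",
   "ledc_api_errors", "other_errors"].map
    (fun k => (k, (tagged.filter (fun p => p.1 == k)).map Prod.snd))

-- ===== PRECONDITION & SPEC =====
def Spec_parse_compilation_errors (output : String) (out : List (String × List String)) : Prop := out = parse_compilation_errors_alt output
instance (output : String) (out : List (String × List String)) : Decidable (Spec_parse_compilation_errors output out) := by unfold Spec_parse_compilation_errors; infer_instance

-- ===== CLAIM (what is proved, stated in full; the proofs are below) =====
def Claim_equal_parse_compilation_errors : Prop := ∀ (output : String), Dom_parse_compilation_errors output → Spec_parse_compilation_errors output (parse_compilation_errors output)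

-- ===== LEMMAS AND PROOFS =====

-- B's line filter, named for the proofs
def pvKeep (l : String) : Bool :=
  PySem.Str.isIn "error:" (PySem.Str.lower l) && !(PySem.Str.strip l == "")

-- B's bucket for key k over a list of lines
def pvBucket (k : String) (ls : List String) : List String :=
  (((ls.filter pvKeep).map (fun l => (pvClassify l, PySem.Str.strip l))).filter
    (fun p => p.1 == k)).map Prod.snd

def pvSixKeys : List String :=
  ["syntax_errors", "missing_headers", "undefined_references", "type_errors",
   "ledc_api_errors", "other_errors"]

lemma pvClassify_mem (l : String) : pvClassify l ∈ pvSixKeys := by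
  unfold pvClassify pvSixKeys
  simp only [List.mem_cons]
  split_ifs <;> simp

lemma pvStepA_not_keep (d : PySem.Dict String (List String)) (l : String)
    (h : pvKeep l = false) : pvStepA d l = d := by
  unfold pvKeep at h
  rcases Bool.and_eq_false_iff.mp h with h1 | h2
  · unfold pvStepA
    rw [h1]
    rfl
  · have h2' : (PySem.Str.strip l == "") = true := by
      cases hb : (PySem.Str.strip l == "") <;> simp [hb] at h2 ⊢
    unfold pvStepA
    cases hc : PySem.Str.isIn "error:" (PySem.Str.lower l)
    · rfl
    · simp only [Bool.not_true, Bool.false_eq_true, if_false, h2', if_true]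

lemma pvStepA_keep (d : PySem.Dict String (List String)) (l : String)
    (h : pvKeep l = true) :
    pvStepA d l = d.modify (pvClassify l) [] (· ++ [PySem.Str.strip l]) := by
  unfold pvKeep at h
  have h1 : PySem.Str.isIn "error:" (PySem.Str.lower l) = true := Bool.and_elim_left h
  have h2 : (PySem.Str.strip l == "") = false := by
    have h2b := Bool.and_elim_right h
    cases hb : (PySem.Str.strip l == "") <;> simp [hb] at h2b ⊢
  unfold pvStepA pvClassify
  simp only [h1, Bool.not_true, Bool.false_eq_true, if_false, h2, Bool.true_and]
  split_ifs <;> rfl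

lemma pvBucket_cons_keep (k : String) (l : String) (ls : List String) (h : pvKeep l = true) :
    pvBucket k (l :: ls)
      = (if pvClassify l = k then [PySem.Str.strip l] else []) ++ pvBucket k ls := by
  unfold pvBucket
  simp only [List.filter_cons, h, if_true, List.map_cons, List.filter_cons]
  by_cases hk : pvClassify l = k <;> simp [hk]

lemma pvBucket_cons_not_keep (k : String) (l : String) (ls : List String) (h : pvKeep l = false) :
    pvBucket k (l :: ls) = pvBucket k ls := by
  unfold pvBucket
  simp [h]

lemma pvGetD_loop (ls : List String) (d : PySem.Dict String (List String)) (k : String) :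
    (ls.foldl pvStepA d).getD k [] = d.getD k [] ++ pvBucket k ls := by
  induction ls generalizing d with
  | nil => simp [pvBucket]
  | cons l ls ih =>
    cases h : pvKeep l with
    | false =>
      rw [List.foldl_cons, pvStepA_not_keep d l h, ih, pvBucket_cons_not_keep k l ls h]
    | true =>
      rw [List.foldl_cons, pvStepA_keep d l h, ih, pvBucket_cons_keep k l ls h,
        PySem.Dict.getD_modify]
      by_cases hk : k = pvClassify l
      · simp [hk, List.append_assoc]
      · have hk2 : ¬ pvClassify l = k := fun hh => hk hh.symm
        simp [hk, hk2]

lemma pvKeys_loop (ls : List String) (d : PySem.Dict String (List String))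
    (h : ∀ k ∈ pvSixKeys, k ∈ d.keys) : (ls.foldl pvStepA d).keys = d.keys := by
  induction ls generalizing d with
  | nil => rfl
  | cons l ls ih =>
    cases hk : pvKeep l with
    | false => rw [List.foldl_cons, pvStepA_not_keep d l hk, ih d h]
    | true =>
      rw [List.foldl_cons, pvStepA_keep d l hk]
      have hc : d.contains (pvClassify l) = true := by
        rw [PySem.Dict.contains_eq_decide_mem_keys]
        exact decide_eq_true (h _ (pvClassify_mem l))
      have hkeys : (d.modify (pvClassify l) [] (· ++ [PySem.Str.strip l])).keys = d.keys := by
        rw [PySem.Dict.keys_modify, PySem.Dict.keys_insert_of_contains _ _ hc]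
      rw [ih _ (by rw [hkeys]; exact h), hkeys]

-- the two ports agree on every string
lemma pv_main (output : String) :
    parse_compilation_errors output = parse_compilation_errors_alt output := by
  unfold parse_compilation_errors parse_compilation_errors_alt
  set ls := (PySem.Str.split? output "\n").getD [] with hls
  set d0 : PySem.Dict String (List String) :=
    PySem.Dict.ofList [("syntax_errors", []), ("missing_headers", []),
      ("undefined_references", []), ("type_errors", []), ("ledc_api_errors", []),
      ("other_errors", [])] with hd0
  have hkeys0 : d0.keys = pvSixKeys := by rw [hd0]; rfl
  have hkeys : (ls.foldl pvStepA d0).keys = pvSixKeys := by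
    rw [pvKeys_loop ls d0 (by rw [hkeys0]; intro k hk; exact hk), hkeys0]
  have hnodup : (ls.foldl pvStepA d0).keys.Nodup := by
    rw [hkeys]; decide
  rw [PySem.Dict.items_eq_map_keys _ hnodup [], hkeys]
  have hget : ∀ k, (ls.foldl pvStepA d0).getD k [] = d0.getD k [] ++ pvBucket k ls :=
    fun k => pvGetD_loop ls d0 k
  show pvSixKeys.map (fun k => (k, (ls.foldl pvStepA d0).getD k [])) = _
  unfold pvSixKeys
  simp only [List.map_cons, List.map_nil, hget]
  rw [hd0]
  rfl

-- ===== VERDICT (by name: the statement is the Claim_ definition above) =====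
theorem parse_compilation_errors_spec : Claim_equal_parse_compilation_errors := by
  intro output _
  exact pv_main output
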